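-- pv_equiv track=rewrite | github.com/ShenanigansBunul/CalculNumericHW | T1.py | sum_b
-- ===== SOURCE A (Python) =====
-- def empty_matrix(w, h):
--     return [[0 for x in range(w)] for y in range(h)]
--
-- def sum_b(mat):
--     si = len(mat)
--     sum_l = []
--     for i in range(0, pow(2, si)):
--         sum_el = empty_matrix(len(mat[0]), 1)[0]
--         bs = format(i, '0' + str(si) + 'b')
--         for j, row in enumerate(mat):
--             if bs[len(bs) - j - 1] == "1":
--                 for k, elt in enumerate(row):
--                     sum_el[k] += elt
--         sum_l.append(sum_el)
--     return sum_l
-- ===== SOURCE B (Python) =====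
-- def sum_b(mat):
--     m = len(mat[0])
--     res = [[0] * m]
--     for row in mat:
--         res = res + [[p[k] + (row[k] if k < len(row) else 0) for k in range(m)]
--                      for p in res]
--     return res
-- ===== Notes on version B (the rewrite author's own statement) =====
-- stated objective: faster
-- what changed: Replaces the per-mask binary-string formatting and rescan of all rows (O(2^n * n * m)) with a subset-sum doubling DP that extends the result list by one row at a time, computing each subset sum from a previously computed one in O(2^n * m).
-- outside the precondition, e.g. on sum_b([]): A raises IndexError, B raises IndexError; on sum_b([[1], [2, 3]]): A raises IndexError, B returns [[0], [1], [2], [3]]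
import Mathlib
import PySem

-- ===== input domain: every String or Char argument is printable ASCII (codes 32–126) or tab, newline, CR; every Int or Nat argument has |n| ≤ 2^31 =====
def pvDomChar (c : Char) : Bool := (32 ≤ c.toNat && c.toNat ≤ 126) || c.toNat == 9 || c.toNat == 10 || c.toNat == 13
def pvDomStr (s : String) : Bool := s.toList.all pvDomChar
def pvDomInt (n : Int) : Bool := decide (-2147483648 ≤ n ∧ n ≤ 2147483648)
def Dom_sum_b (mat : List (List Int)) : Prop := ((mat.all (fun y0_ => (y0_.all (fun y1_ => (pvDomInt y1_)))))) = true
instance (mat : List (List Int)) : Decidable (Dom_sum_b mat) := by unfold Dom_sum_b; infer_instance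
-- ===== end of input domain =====

-- B replaces A's per-mask binary-string formatting and rescan of all rows with a
-- subset-sum doubling DP (each subset sum extends a previously computed one by one row);
-- a timing run measured B faster.

-- ===== PORT A =====
-- binary digits of n ≥ 1 (format(n, 'b')), hand-ported: exact on Nat
def pyBinDigits (n : Nat) : List Char :=
  if h : n = 0 then [] else pyBinDigits (n / 2) ++ [if n % 2 = 1 then '1' else '0']
decreasing_by exact Nat.div_lt_self (Nat.pos_of_ne_zero h) one_lt_two

-- format(i, '0' + str(w) + 'b') for i ≥ 0: binary digits left-padded with '0' to width w; exact for i ≥ 0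
def fmtBin (i w : Nat) : List Char :=
  let s := if i = 0 then ['0'] else pyBinDigits i
  List.replicate (w - s.length) '0' ++ s

def sum_b (mat : List (List Int)) : List (List Int) :=
  let si := mat.length
  -- for i in range(0, pow(2, si)): i runs over 0 .. 2^si - 1, all nonnegative
  (List.range (2 ^ si)).foldl (fun sum_l i =>
    -- empty_matrix(len(mat[0]), 1)[0]: Python raises IndexError on mat = [] (excluded by Pre_)
    let sum_el0 : List Int := (List.range (mat.headD []).length).map (fun _ => (0 : Int))
    let bs := fmtBin i si
    let sum_el := (PySem.List.enumerate mat).foldl (fun se jr =>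
        if PySem.List.pyGetD bs ((bs.length : Int) - jr.1 - 1) ' ' = '1' then
          -- sum_el[k] += elt: IndexError when a row is longer than mat[0] (excluded by Pre_)
          (PySem.List.enumerate jr.2).foldl (fun se2 ke =>
            PySem.List.pySetD se2 ke.1 (PySem.List.pyGetD se2 ke.1 0 + ke.2)) se
        else se) sum_el0
    sum_l ++ [sum_el]) []

-- ===== PORT B =====
-- [p[k] + (row[k] if k < len(row) else 0) for k in range(m)]
def addRowB (m : Nat) (p row : List Int) : List Int :=
  (List.range m).map (fun k => p.getD k 0 + row.getD k 0)

def sum_b_alt (mat : List (List Int)) : List (List Int) :=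
  let m := (mat.headD []).length   -- len(mat[0]): Python raises IndexError on mat = [] (excluded by Pre_)
  mat.foldl (fun res row => res ++ res.map (fun p => addRowB m p row)) [List.replicate m 0]

-- ===== PRECONDITION & SPEC =====
-- Pre_ excludes exactly the inputs where Python A raises IndexError: the empty matrix
-- (mat[0]) and matrices with a row longer than the first row (sum_el[k] += elt).
def Pre_sum_b (mat : List (List Int)) : Prop :=
  mat ≠ [] ∧ ∀ row ∈ mat, row.length ≤ (mat.headD []).length
instance (mat : List (List Int)) : Decidable (Pre_sum_b mat) := by unfold Pre_sum_b; infer_instance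

def pvWitness_sum_b : List (List Int) := [[1, 2], [3, 4]]

def Spec_sum_b (mat : List (List Int)) (out : List (List Int)) : Prop := out = sum_b_alt mat
instance (mat : List (List Int)) (out : List (List Int)) : Decidable (Spec_sum_b mat out) := by unfold Spec_sum_b; infer_instance

-- ===== CLAIM (what is proved, stated in full; the proofs are below) =====
def Claim_equal_sum_b : Prop := ∀ (mat : List (List Int)), Dom_sum_b mat → Pre_sum_b mat → Spec_sum_b mat (sum_b mat)

-- ===== LEMMAS AND PROOFS =====
lemma pvFoldSet_length (l : List (Int × Int)) : ∀ (se : List Int),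
    (l.foldl (fun se2 ke => PySem.List.pySetD se2 ke.1 (PySem.List.pyGetD se2 ke.1 0 + ke.2)) se).length
      = se.length := by
  induction l with
  | nil => intro se; rfl
  | cons x xs ih => intro se; simp [List.foldl_cons, ih, PySem.List.length_pySetD]

lemma pyBin_len_le : ∀ (n i : Nat), i < 2 ^ n → (pyBinDigits i).length ≤ n := by
  intro n
  induction n with
  | zero => intro i hi; interval_cases i; simp [pyBinDigits]
  | succ n ih =>
    intro i hi
    rw [pyBinDigits]
    split
    · simp
    · rename_i h
      have := ih (i / 2) (by omega)
      simp; omega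

lemma pyBin_lt : ∀ (i : Nat), i < 2 ^ (pyBinDigits i).length := by
  intro i
  induction i using Nat.strong_induction_on with
  | _ i ih =>
    rw [pyBinDigits]
    split
    · rename_i h; subst h; simp
    · rename_i h
      have := ih (i / 2) (Nat.div_lt_self (Nat.pos_of_ne_zero h) one_lt_two)
      simp [pow_succ]
      omega

lemma pyBinRev_getD : ∀ (i : Nat), ∀ (k : Nat),
    ((pyBinDigits i).reverse).getD k '0' = if i / 2 ^ k % 2 = 1 then '1' else '0' := by
  intro i
  induction i using Nat.strong_induction_on with
  | _ i ih =>
    intro k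
    rw [pyBinDigits]
    split
    · rename_i h; subst h; simp
    · rename_i h
      rw [List.reverse_append]
      cases k with
      | zero => simp
      | succ k =>
        have := ih (i / 2) (Nat.div_lt_self (Nat.pos_of_ne_zero h) one_lt_two) k
        simp only [List.reverse_singleton, List.singleton_append, List.getD_cons_succ]
        rw [this, Nat.div_div_eq_div_mul, pow_succ]
        ring_nf

lemma fmt_len {i n : Nat} (hi : i < 2 ^ n) (hn : 1 ≤ n) : (fmtBin i n).length = n := by
  have h : (if i = 0 then ['0'] else pyBinDigits i).length ≤ n := by
    split
    · simpa using hn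
    · exact pyBin_len_le n i hi
  simp [fmtBin]
  omega

lemma sRev_getD (i : Nat) (k : Nat) :
    ((if i = 0 then ['0'] else pyBinDigits i).reverse).getD k '0'
      = if i / 2 ^ k % 2 = 1 then '1' else '0' := by
  split
  · rename_i h; subst h
    cases k <;> simp
  · exact pyBinRev_getD i k

lemma charBit {i n k : Nat} (hi : i < 2 ^ n) (hk : k < n) :
    PySem.List.pyGetD (fmtBin i n) (((fmtBin i n).length : Int) - (k : Int) - 1) ' '
      = (if i / 2 ^ k % 2 = 1 then '1' else '0') := by
  have hn : 1 ≤ n := by omega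
  have hlen : (fmtBin i n).length = n := fmt_len hi hn
  set bs := fmtBin i n with hbs
  have hidx : ((bs.length : Int) - (k : Int) - 1) = ((n - k - 1 : Nat) : Int) := by
    rw [hlen]; omega
  rw [hidx, PySem.List.pyGetD_natCast]
  -- bs[n-k-1] = bs.reverse[k]
  have hk' : n - k - 1 < bs.length := by omega
  have hkr : k < bs.reverse.length := by simp [hlen]; omega
  have hrev : bs[n - k - 1]'hk' = bs.reverse[k]'hkr := by
    rw [List.getElem_reverse]
    congr 1
    omega
  rw [List.getD_eq_getElem _ _ hk', hrev]
  -- bs.reverse = s.reverse ++ replicate (n - s.length) '0'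
  set s := if i = 0 then ['0'] else pyBinDigits i with hs
  have hbsrev : bs.reverse = s.reverse ++ List.replicate (n - s.length) '0' := by
    simp [hbs, fmtBin, List.reverse_append, ← hs]
  have hsn : s.length ≤ n := by
    rw [hs]; split
    · simpa using hn
    · exact pyBin_len_le n i hi
  by_cases hks : k < s.length
  · have hks2 : k < s.reverse.length := by simpa using hks
    have heq : bs.reverse[k]'hkr = s.reverse.getD k '0' := by
      have h1 : bs.reverse[k]? = s.reverse[k]? := by
        rw [hbsrev]; exact List.getElem?_append_left (by simpa using hks)
      have h2 := List.getElem?_eq_getElem hkr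
      rw [h1, List.getElem?_eq_getElem hks2] at h2
      rw [← Option.some.inj h2, List.getD_eq_getElem _ _ hks2]
    rw [heq, sRev_getD]
  · -- zero-padding region: the bit is 0 because i < 2^s.length ≤ 2^k
    have hilt : i < 2 ^ k := by
      have h2 : i < 2 ^ s.length := by
        rw [hs]; split
        · rename_i h; subst h; simp
        · exact pyBin_lt i
      calc i < 2 ^ s.length := h2
        _ ≤ 2 ^ k := Nat.pow_le_pow_right (by omega) (by omega)
    have hz : i / 2 ^ k = 0 := Nat.div_eq_of_lt hilt
    have hkn : k < bs.reverse.length := hkr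
    have heq : bs.reverse[k]'hkr = '0' := by
      have h1 : bs.reverse[k]? = some '0' := by
        rw [hbsrev, List.getElem?_append_right (by simpa using hks), List.getElem?_replicate,
            if_pos (by simp only [List.length_reverse]; omega)]
      have h2 := List.getElem?_eq_getElem hkr
      rw [h1] at h2
      exact (Option.some.inj h2).symm
    rw [heq, hz]
    simp

def pvAddInto (se row : List Int) : List Int :=
  (PySem.List.enumerate row).foldl (fun se2 ke =>
    PySem.List.pySetD se2 ke.1 (PySem.List.pyGetD se2 ke.1 0 + ke.2)) se

lemma pvAddInto_length (se row : List Int) : (pvAddInto se row).length = se.length :=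
  pvFoldSet_length _ se

lemma pvAddInto_gen (row : List Int) : ∀ (s : Nat) (se : List Int), s + row.length ≤ se.length →
    (PySem.List.enumerate row (s : Int)).foldl (fun se2 ke =>
        PySem.List.pySetD se2 ke.1 (PySem.List.pyGetD se2 ke.1 0 + ke.2)) se
      = (List.range se.length).map
          (fun k => se.getD k 0 + (if s ≤ k ∧ k - s < row.length then row.getD (k - s) 0 else 0)) := by
  induction row with
  | nil =>
    intro s se _
    simp only [PySem.List.enumerate_nil, List.foldl_nil]
    apply List.ext_getElem
    · simp
    · intro k h1 h2
      have hk : k < se.length := by simpa using h1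
      simp only [List.getElem_map, List.getElem_range]
      rw [List.getD_eq_getElem _ _ hk, if_neg (by simp)]
      simp
  | cons x row ih =>
    intro s se hlen
    rw [List.length_cons] at hlen
    have hs : s < se.length := by omega
    rw [PySem.List.enumerate_cons]
    simp only [List.foldl_cons]
    have hcast : (s : Int) + 1 = ((s + 1 : Nat) : Int) := by push_cast; ring
    rw [hcast]
    have hstep : (PySem.List.pySetD se (s : Int) (PySem.List.pyGetD se (s : Int) 0 + x))
        = se.set s (se.getD s 0 + x) := by
      simp [PySem.List.pySetD_natCast, PySem.List.pyGetD_natCast]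
    rw [hstep, ih (s + 1) _ (by rw [List.length_set]; omega)]
    apply List.ext_getElem
    · simp
    · intro k h1 h2
      simp only [List.getElem_map, List.getElem_range, List.length_set, List.length_cons] at *
      have hset : (se.set s (se.getD s 0 + x)).getD k 0
          = if k = s then se.getD s 0 + x else se.getD k 0 := by
        by_cases hks : k = s
        · subst hks
          rw [List.getD_eq_getElem _ _ (by simpa using h1), List.getElem_set_self (by simpa using hs)]
          simp
        · rw [if_neg hks]
          by_cases hk2 : k < se.length
          · rw [List.getD_eq_getElem _ _ (by simpa using hk2),
                List.getElem_set_ne (by omega), List.getD_eq_getElem _ _ hk2]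
          · rw [List.getD_eq_default _ _ (by simpa using (by omega : ¬ k < se.length)),
                List.getD_eq_default _ _ (by omega)]
      rw [hset]
      by_cases hks : k = s
      · subst hks
        simp
      · by_cases hk3 : s + 1 ≤ k ∧ k - (s + 1) < row.length
        · have hc : s ≤ k ∧ k - s < row.length + 1 := by omega
          rw [if_pos hk3, if_pos hc, if_neg hks]
          have h6 : k - s = (k - (s + 1)) + 1 := by omega
          rw [h6, List.getD_cons_succ]
        · have hc : ¬ (s ≤ k ∧ k - s < row.length + 1) := by omega
          rw [if_neg hk3, if_neg hc, if_neg hks]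

lemma pvAddInto_eq (se row : List Int) (h : row.length ≤ se.length) :
    pvAddInto se row = addRowB se.length se row := by
  unfold pvAddInto addRowB
  have h0 : ((0 : Nat) : Int) = (0 : Int) := by norm_num
  rw [show PySem.List.enumerate row = PySem.List.enumerate row ((0 : Nat) : Int) by norm_num]
  rw [pvAddInto_gen row 0 se (by omega)]
  apply List.map_congr_left
  intro k hk
  simp only [List.mem_range] at hk
  by_cases hkr : k < row.length
  · simp [hkr]
  · have h5 : row.getD k (0 : Int) = 0 := List.getD_eq_default _ _ (by omega)
    rw [if_neg (by omega), h5]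

def pvSA : List Int → List (List Int) → Nat → List Int
  | se, [], _ => se
  | se, r :: rs, i => pvSA (if i % 2 = 1 then pvAddInto se r else se) rs (i / 2)

lemma pvSA_length : ∀ (rows : List (List Int)) (se : List Int) (i : Nat),
    (pvSA se rows i).length = se.length := by
  intro rows
  induction rows with
  | nil => intro se i; rfl
  | cons r rs ih =>
    intro se i
    rw [pvSA, ih]
    split <;> simp [pvAddInto_length]

lemma pvSA_mod : ∀ (rows : List (List Int)) (se : List Int) (i : Nat),
    pvSA se rows i = pvSA se rows (i % 2 ^ rows.length) := by
  intro rows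
  induction rows with
  | nil => intro se i; rfl
  | cons r rs ih =>
    intro se i
    rw [pvSA, pvSA]
    have hp : (2 : Nat) ^ (r :: rs).length = 2 * 2 ^ rs.length := by
      simp [pow_succ]; ring
    have h1 : i % 2 ^ (r :: rs).length % 2 = i % 2 := by
      rw [hp, Nat.mod_mod_of_dvd _ ⟨2 ^ rs.length, by ring⟩]
    have h2 : i % 2 ^ (r :: rs).length / 2 = i / 2 % 2 ^ rs.length := by
      rw [hp]
      exact Nat.mod_mul_right_div_self i 2 (2 ^ rs.length)
    rw [h1, h2, ← ih]

lemma pvSA_append : ∀ (rows : List (List Int)) (se : List Int) (i : Nat) (r : List Int),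
    pvSA se (rows ++ [r]) i
      = (if (i / 2 ^ rows.length) % 2 = 1 then pvAddInto (pvSA se rows i) r else pvSA se rows i) := by
  intro rows
  induction rows with
  | nil => intro se i r; simp [pvSA]
  | cons a rs ih =>
    intro se i r
    rw [List.cons_append, pvSA, pvSA, ih]
    have : i / 2 / 2 ^ rs.length = i / 2 ^ (a :: rs).length := by
      rw [Nat.div_div_eq_div_mul]
      congr 1
      simp [pow_succ]
      ring
    rw [this]

lemma pvInnerA {i n : Nat} (hi : i < 2 ^ n) :
    ∀ (rows : List (List Int)) (s : Nat) (se : List Int), s + rows.length ≤ n →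
    (PySem.List.enumerate rows (s : Int)).foldl (fun se jr =>
        if PySem.List.pyGetD (fmtBin i n) (((fmtBin i n).length : Int) - jr.1 - 1) ' ' = '1' then
          (PySem.List.enumerate jr.2).foldl (fun se2 ke =>
            PySem.List.pySetD se2 ke.1 (PySem.List.pyGetD se2 ke.1 0 + ke.2)) se
        else se) se
      = pvSA se rows (i / 2 ^ s) := by
  intro rows
  induction rows with
  | nil => intro s se _; simp [PySem.List.enumerate_nil, pvSA]
  | cons r rs ih =>
    intro s se hb
    rw [List.length_cons] at hb
    have hsn : s < n := by omega
    rw [PySem.List.enumerate_cons, List.foldl_cons, pvSA]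
    have hcast : (s : Int) + 1 = ((s + 1 : Nat) : Int) := by push_cast; ring
    have hdiv : i / 2 ^ s / 2 = i / 2 ^ (s + 1) := by
      rw [Nat.div_div_eq_div_mul, pow_succ]
    rw [hcast, ih (s + 1) _ (by omega), hdiv]
    congr 1
    simp only [charBit hi hsn]
    by_cases hq : i / 2 ^ s % 2 = 1
    · simp [hq, pvAddInto]
    · simp [hq]

lemma pvB (m : Nat) (mat : List (List Int)) (hrows : ∀ r ∈ mat, r.length ≤ m) :
    mat.foldl (fun res row => res ++ res.map (fun p => addRowB m p row)) [List.replicate m 0]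
      = (List.range (2 ^ mat.length)).map (fun i => pvSA (List.replicate m 0) mat i) := by
  induction mat using List.reverseRecOn with
  | nil => simp [pvSA]
  | append_singleton mat r ih =>
    have hr : r.length ≤ m := hrows r (by simp)
    have hmat : ∀ r' ∈ mat, r'.length ≤ m := fun r' h => hrows r' (by simp [h])
    rw [List.foldl_append, List.foldl_cons, List.foldl_nil, ih hmat]
    rw [List.length_append, List.length_cons, List.length_nil]
    rw [show (2 : Nat) ^ (mat.length + (0 + 1)) = 2 ^ mat.length + 2 ^ mat.length by
      rw [pow_succ]; ring, List.range_add, List.map_append]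
    congr 1
    · apply List.map_congr_left
      intro i hi0
      simp only [List.mem_range] at hi0
      rw [pvSA_append, if_neg (by rw [Nat.div_eq_of_lt hi0]; omega)]
    · rw [List.map_map, List.map_map]
      apply List.map_congr_left
      intro i hi0
      simp only [List.mem_range] at hi0
      simp only [Function.comp_apply]
      have h1 : (2 ^ mat.length + i) / 2 ^ mat.length = 1 := by
        rw [Nat.add_comm, Nat.add_div_right _ (by positivity), Nat.div_eq_of_lt hi0]
      rw [pvSA_append, h1, if_pos (by norm_num)]
      have hmod : pvSA (List.replicate m 0) mat (2 ^ mat.length + i)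
          = pvSA (List.replicate m 0) mat i := by
        rw [pvSA_mod mat _ (2 ^ mat.length + i), pvSA_mod mat _ i]
        congr 1
        rw [Nat.add_mod_left]
      rw [hmod, pvAddInto_eq _ _ (by rw [pvSA_length, List.length_replicate]; exact hr)]
      rw [pvSA_length, List.length_replicate]

theorem sum_b_eq (mat : List (List Int))
    (hrows : ∀ row ∈ mat, row.length ≤ (mat.headD []).length) :
    sum_b mat = sum_b_alt mat := by
  unfold sum_b sum_b_alt
  rw [pvB (mat.headD []).length mat hrows]
  rw [PySem.List.foldl_append_singleton_eq_map]
  rw [List.nil_append]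
  apply List.map_congr_left
  intro i hi0
  simp only [List.mem_range] at hi0
  have hbase : (List.range (mat.headD []).length).map (fun _ => (0 : Int))
      = List.replicate (mat.headD []).length 0 := by
    rw [List.map_const', List.length_range]
  have h := pvInnerA hi0 mat 0 (List.replicate (mat.headD []).length 0) (by omega)
  simp only [Nat.cast_zero, pow_zero, Nat.div_one] at h
  rw [hbase, h]

-- ===== VERDICT (by name: the statement is the Claim_ definition above) =====
theorem sum_b_spec : Claim_equal_sum_b := by
  intro mat _ hpre
  exact sum_b_eq mat hpre.2
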